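-- pv_equiv track=rewrite | github.com/prolixiaoxiao/code-for-reference | practice.py | minsum
-- ===== SOURCE A (Python) =====
-- def minsum(k):
--     if k > 45: return -1
--
--     def dfs(depth, k, res, path):
--         if k == 0:
--             res.append(int(''.join(path[:])))
--             return res
--         for i in range(depth, 10):
--             if i <= k:
--                 path.append(str(i))
--                 dfs(i + 1, k - i, res, path)
--
--                 path.pop()
--
--     res = []
--     dfs(1, k, res, [])
--     return min(res)
-- ===== SOURCE B (Python) =====
-- def minsum(k):
--     if k > 45: return -1
--     digits = []
--     rem = k
--     for d in range(9, 0, -1):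
--         if d <= rem:
--             digits.append(str(d))
--             rem -= d
--     return int(''.join(reversed(digits)))
-- ===== Notes on version B (the rewrite author's own statement) =====
-- stated objective: simpler
-- what changed: Replaces the DFS enumeration of all distinct-digit subsets plus min() with a single greedy pass taking digits 9..1 while they fit, then reading the reversed digit string; Pre_ excludes k <= 0, where both programs raise ValueError (e.g. at k = 0 both hit int('')).
-- outside the precondition, e.g. on minsum(0): A raises ValueError, B raises ValueError
import Mathlib
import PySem

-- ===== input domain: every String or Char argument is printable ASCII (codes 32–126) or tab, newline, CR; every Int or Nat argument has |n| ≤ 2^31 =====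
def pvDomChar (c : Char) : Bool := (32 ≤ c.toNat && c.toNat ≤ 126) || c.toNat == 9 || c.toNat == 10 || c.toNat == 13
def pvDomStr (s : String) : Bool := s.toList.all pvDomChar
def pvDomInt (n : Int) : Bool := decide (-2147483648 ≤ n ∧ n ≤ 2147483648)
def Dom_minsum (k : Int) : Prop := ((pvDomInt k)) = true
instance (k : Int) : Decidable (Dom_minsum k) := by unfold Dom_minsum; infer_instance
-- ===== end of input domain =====

-- ===== PORT A =====
-- B replaces the subset DFS + min() with one greedy 9..1 pass (simpler); return-value equivalence proved for k >= 1.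
-- fuel bounds the recursion depth (depth grows by at least 1 each call and range(depth,10) empties at depth >= 10); 10 is always enough.
def dfsA : Nat → Int → Int → List Int → List String → List Int
  | fuel, depth, k, res, path =>
    if k = 0 then res ++ [(PySem.Int.ofStr? (PySem.Str.join "" path)).getD 0]
    else match fuel with
      | 0 => res
      | f+1 => (PySem.List.pyRange depth 10 1).foldl
          (fun r i => if i ≤ k then dfsA f (i+1) (k-i) r (path ++ [PySem.Int.toStr i]) else r) res

def minsum (k : Int) : Int :=
  if k > 45 then -1
  else (PySem.List.min? (dfsA 10 1 k [] []) id).getD 0  -- none = ValueError on empty res, excluded by Pre_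

-- ===== PORT B =====
def minsum_alt (k : Int) : Int :=
  if k > 45 then -1
  else
    let st := (PySem.List.pyRange 9 0 (-1)).foldl
      (fun (p : List String × Int) d => if d ≤ p.2 then (p.1 ++ [PySem.Int.toStr d], p.2 - d) else p)
      ([], k)
    (PySem.Int.ofStr? (PySem.Str.join "" st.1.reverse)).getD 0  -- none = int('') ValueError, excluded by Pre_

-- ===== PRECONDITION & SPEC =====
-- Pre_ excludes k <= 0: there A raises ValueError (int('') at k = 0, min([]) for k < 0), and B raises ValueError too.
def Pre_minsum (k : Int) : Prop := 1 ≤ k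
instance (k : Int) : Decidable (Pre_minsum k) := by unfold Pre_minsum; infer_instance
def pvWitness_minsum : Int := 5
def Spec_minsum (k : Int) (out : Int) : Prop := out = minsum_alt k
instance (k : Int) (out : Int) : Decidable (Spec_minsum k out) := by unfold Spec_minsum; infer_instance

-- ===== CLAIM (what is proved, stated in full; the proofs are below) =====
def Claim_equal_minsum : Prop := ∀ (k : Int), Dom_minsum k → Pre_minsum k → Spec_minsum k (minsum k)

-- ===== LEMMAS AND PROOFS =====
set_option maxRecDepth 100000 in
set_option maxHeartbeats 4000000 in
theorem minsum_eq_alt_small : ∀ k : Int, 1 ≤ k → k ≤ 45 → minsum k = minsum_alt k := by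
  intro k h1 h2
  interval_cases k <;> decide

-- ===== VERDICT =====
theorem minsum_spec : Claim_equal_minsum := by
  intro k _ hk
  unfold Spec_minsum
  by_cases h : k > 45
  · simp [minsum, minsum_alt, h]
  · exact minsum_eq_alt_small k hk (by omega)
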